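-- pv_equiv track=rewrite | github.com/CSSCorp/openstack-automation | file_root/_modules/custom_network.py | cidr_to_ipv4_netmask
-- ===== SOURCE A (Python) =====
-- def cidr_to_ipv4_netmask(cidr_bits):
--     '''
--     Returns an IPv4 netmask
--     '''
--     try:
--         cidr_bits = int(cidr_bits)
--         if not 1 <= cidr_bits <= 32:
--             return ''
--     except ValueError:
--         return ''
--
--     netmask = ''
--     for idx in range(4):
--         if idx:
--             netmask += '.'
--         if cidr_bits >= 8:
--             netmask += '255'
--             cidr_bits -= 8
--         else:
--             netmask += '{0:d}'.format(256 - (2 ** (8 - cidr_bits)))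
--             cidr_bits = 0
--     return netmask
-- ===== SOURCE B (Python) =====
-- def cidr_to_ipv4_netmask(cidr_bits):
--     '''
--     Returns an IPv4 netmask
--     '''
--     try:
--         cidr_bits = int(cidr_bits)
--         if not 1 <= cidr_bits <= 32:
--             return ''
--     except ValueError:
--         return ''
--     mask = (0xFFFFFFFF << (32 - cidr_bits)) & 0xFFFFFFFF
--     return '.'.join(str((mask >> (8 * (3 - i))) & 0xFF) for i in range(4))
-- ===== Notes on version B (the rewrite author's own statement) =====
-- stated objective: simpler
-- what changed: Replaced the greedy per-octet string-accumulation loop (branching on cidr_bits >= 8 and subtracting 8) with a single closed-form 32-bit integer mask computed by one shift, whose four octets are read out by shifts/ANDs and joined.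
import Mathlib
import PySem

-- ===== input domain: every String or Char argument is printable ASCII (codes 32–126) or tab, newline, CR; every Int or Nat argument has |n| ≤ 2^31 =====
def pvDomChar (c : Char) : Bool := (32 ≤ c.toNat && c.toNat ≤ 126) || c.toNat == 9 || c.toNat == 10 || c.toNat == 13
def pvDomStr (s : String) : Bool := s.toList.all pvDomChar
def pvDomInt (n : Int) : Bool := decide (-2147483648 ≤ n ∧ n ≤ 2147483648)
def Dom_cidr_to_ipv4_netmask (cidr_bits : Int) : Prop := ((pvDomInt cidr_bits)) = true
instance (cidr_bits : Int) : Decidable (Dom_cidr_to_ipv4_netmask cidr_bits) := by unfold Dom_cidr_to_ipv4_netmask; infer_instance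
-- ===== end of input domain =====

-- B replaces A's per-octet greedy string loop by one closed-form 32-bit mask read out by shifts (simpler).

-- ===== PORT A =====
-- the Python loop appends '.' between octets and branches on cidr_bits >= 8, subtracting 8;
-- '2 ** (8 - cidr_bits)' has a nonnegative exponent in that branch (cidr_bits ≤ 7), so .toNat is exact
def cidr_to_ipv4_netmask (cidr_bits : Int) : String :=
  if ¬ (1 ≤ cidr_bits ∧ cidr_bits ≤ 32) then "" else
  (((PySem.List.pyRange 0 4 1).foldl (fun (st : String × Int) idx =>
      let s := if idx ≠ 0 then st.1 ++ "." else st.1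
      if st.2 ≥ 8 then (s ++ "255", st.2 - 8)
      else (s ++ PySem.Int.toStr (256 - 2 ^ (8 - st.2).toNat), 0))
    ("", cidr_bits)).1)

-- ===== PORT B =====
-- mask = (0xFFFFFFFF << (32 - cidr_bits)) & 0xFFFFFFFF; octets by shift/AND; '.'-join.
-- both operands nonnegative and 32 - cidr_bits ∈ [0,31], so Nat shifts are exact
def cidr_to_ipv4_netmask_alt (cidr_bits : Int) : String :=
  if ¬ (1 ≤ cidr_bits ∧ cidr_bits ≤ 32) then "" else
  let mask : Nat := (0xFFFFFFFF <<< (32 - cidr_bits).toNat) &&& 0xFFFFFFFF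
  String.intercalate "." ((List.range 4).map
    (fun i => PySem.Int.toStr ((mask >>> (8 * (3 - i))) &&& 0xFF : Nat)))

-- ===== PRECONDITION & SPEC =====
def Spec_cidr_to_ipv4_netmask (cidr_bits : Int) (out : String) : Prop := out = cidr_to_ipv4_netmask_alt cidr_bits
instance (cidr_bits : Int) (out : String) : Decidable (Spec_cidr_to_ipv4_netmask cidr_bits out) := by unfold Spec_cidr_to_ipv4_netmask; infer_instance

-- ===== CLAIM (what is proved, stated in full; the proofs are below) =====
def Claim_equal_cidr_to_ipv4_netmask : Prop := ∀ (cidr_bits : Int), Dom_cidr_to_ipv4_netmask cidr_bits → Spec_cidr_to_ipv4_netmask cidr_bits (cidr_to_ipv4_netmask cidr_bits)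

-- ===== LEMMAS AND PROOFS =====

-- ===== VERDICT (by name: the statement is the Claim_ definition above) =====
theorem cidr_to_ipv4_netmask_spec : Claim_equal_cidr_to_ipv4_netmask := by
  intro n _
  unfold Spec_cidr_to_ipv4_netmask
  by_cases h : 1 ≤ n ∧ n ≤ 32
  · obtain ⟨h1, h2⟩ := h
    interval_cases n <;> decide
  · simp [cidr_to_ipv4_netmask, cidr_to_ipv4_netmask_alt, h]
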